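-- pv_equiv track=rewrite | github.com/population-interventions/PythonGlue | PMSLT_output/source/include/utilities.py | DictRemove
-- ===== SOURCE A (Python) =====
-- def DictRemove(myDict, element):
-- 	myCopy = myDict.copy()
-- 	if isinstance(element, dict):
-- 		for name in element.keys():
-- 			myDict = DictRemove(myDict, name)
-- 		return myDict
-- 	if isinstance(element, list):
-- 		for name in element:
-- 			myDict = DictRemove(myDict, name)
-- 		return myDict
-- 	if element in myCopy:
-- 		myCopy.pop(element)
-- 	return myCopy
-- ===== SOURCE B (Python) =====
-- def DictRemove(myDict, element):
--     # Flatten element (scalar / list / dict, possibly nested) into a set of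
--     # keys once, then build the result dict in a single comprehension pass.
--     drop = set()
--     stack = [element]
--     while stack:
--         e = stack.pop()
--         if isinstance(e, dict):
--             stack.extend(e.keys())
--         elif isinstance(e, list):
--             stack.extend(e)
--         else:
--             drop.add(e)
--     return {k: v for k, v in myDict.items() if k not in drop}
-- ===== Notes on version B (the rewrite author's own statement) =====
-- stated objective: simpler
-- what changed: A copies the dict and pops the key after a membership test (recursing per key for list/dict elements); B flattens the keys to drop into a set once and builds the result in a single dict comprehension, no copy/pop and no recursion.
import Mathlib
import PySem

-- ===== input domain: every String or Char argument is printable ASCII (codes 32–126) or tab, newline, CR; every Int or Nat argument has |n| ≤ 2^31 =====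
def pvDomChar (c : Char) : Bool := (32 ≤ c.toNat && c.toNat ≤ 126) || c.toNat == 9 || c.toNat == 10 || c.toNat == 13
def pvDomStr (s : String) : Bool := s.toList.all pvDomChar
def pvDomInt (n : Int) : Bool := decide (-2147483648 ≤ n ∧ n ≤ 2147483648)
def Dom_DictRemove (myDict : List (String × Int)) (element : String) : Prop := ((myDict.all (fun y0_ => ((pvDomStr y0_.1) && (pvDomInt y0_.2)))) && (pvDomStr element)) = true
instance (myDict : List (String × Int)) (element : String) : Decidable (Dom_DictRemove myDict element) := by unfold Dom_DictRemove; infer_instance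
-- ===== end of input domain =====

-- B replaces A's copy / membership-test / pop with one filtering pass over the items (objective: simpler).
-- With a String element only A's scalar branch is reachable; the dict/list recursion of A (and B's set
-- flattening) is outside the List (String × Int) × String signature and not part of the claim.

-- ===== PORT A =====
-- myCopy = myDict.copy(); if element in myCopy: myCopy.pop(element); return myCopy
def DictRemove (myDict : List (String × Int)) (element : String) : List (String × Int) :=
  let myCopy := PySem.Dict.ofList myDict
  (if myCopy.contains element then myCopy.erase element else myCopy).items

-- ===== PORT B =====
-- B's drop set for a String element is the singleton {element}; 'k not in drop' is k ≠ element,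
-- so the dict comprehension over myDict.items() is this single filter (exact: a dict's keys are distinct).
def DictRemove_alt (myDict : List (String × Int)) (element : String) : List (String × Int) :=
  (PySem.Dict.ofList myDict).items.filter (fun p => p.1 != element)

-- ===== PRECONDITION & SPEC =====
def Spec_DictRemove (myDict : List (String × Int)) (element : String) (out : List (String × Int)) : Prop := out = DictRemove_alt myDict element
instance (myDict : List (String × Int)) (element : String) (out : List (String × Int)) : Decidable (Spec_DictRemove myDict element out) := by unfold Spec_DictRemove; infer_instance

-- ===== CLAIM (what is proved, stated in full; the proofs are below) =====
def Claim_equal_DictRemove : Prop := ∀ (myDict : List (String × Int)) (element : String), Dom_DictRemove myDict element → Spec_DictRemove myDict element (DictRemove myDict element)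

-- ===== LEMMAS AND PROOFS =====

-- ===== VERDICT (by name: the statement is the Claim_ definition above) =====
theorem DictRemove_spec : Claim_equal_DictRemove := by
  intro myDict element _
  unfold Spec_DictRemove DictRemove DictRemove_alt
  simp only [PySem.Dict.erase, bne]
  split_ifs with h
  · rfl
  · symm
    apply List.filter_eq_self.mpr
    intro p hp
    simp only [PySem.Dict.contains, List.any_eq_true, not_exists, not_and,
      Bool.not_eq_true] at h ⊢
    simp [h p hp]
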